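-- pv_equiv track=rewrite | github.com/dev-aliraza/Go-builder | go-builder.py | create_builds_array
-- ===== SOURCE A (Python) =====
-- def create_builds_array(builds):
-- 	builds_dict = {}
-- 	if builds:
-- 		builds_array = builds.split(":")
-- 		for build in builds_array:
-- 			os_arch = build.split("/")
--
-- 			if os_arch[1] == "*":
-- 				builds_dict[os_arch[0]] = ["*"]
--
-- 			if os_arch[0] in builds_dict:
-- 				if builds_dict[os_arch[0]][0] != "*":
-- 					builds_dict[os_arch[0]].append(os_arch[1])
-- 			else:
-- 				builds_dict[os_arch[0]] = [os_arch[1]]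
--
-- 	return builds_dict
-- ===== SOURCE B (Python) =====
-- def create_builds_array(builds):
-- 	builds_dict = {}
-- 	if builds:
-- 		for build in builds.split(":"):
-- 			parts = build.split("/")
-- 			builds_dict.setdefault(parts[0], []).append(parts[1])
-- 		for os in builds_dict:
-- 			if "*" in builds_dict[os]:
-- 				builds_dict[os] = ["*"]
-- 	return builds_dict
-- ===== Notes on version B (the rewrite author's own statement) =====
-- stated objective: simpler
-- what changed: A interleaves a reset-to-['*'] overwrite, a head-sentinel test and a skip/append/insert three-way branch inside one loop; B is a plain two-phase decomposition: collect every arch per os with setdefault(...).append(...), then normalize any list containing '*' to ['*'] in a second pass.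
import Mathlib
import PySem

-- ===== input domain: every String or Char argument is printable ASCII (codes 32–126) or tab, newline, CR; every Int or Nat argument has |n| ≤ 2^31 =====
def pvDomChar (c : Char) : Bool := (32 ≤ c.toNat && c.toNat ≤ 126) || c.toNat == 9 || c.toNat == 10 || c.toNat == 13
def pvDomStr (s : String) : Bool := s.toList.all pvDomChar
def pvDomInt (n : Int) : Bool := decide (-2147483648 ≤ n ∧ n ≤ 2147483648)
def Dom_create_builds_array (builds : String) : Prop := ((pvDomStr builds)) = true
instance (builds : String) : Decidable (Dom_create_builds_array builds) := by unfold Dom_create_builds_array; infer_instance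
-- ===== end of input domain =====

-- B replaces A's incremental reset-and-skip dict logic by a plain collect-all-then-normalize
-- decomposition (gather every arch per os, then collapse any list containing "*" to ["*"]): simpler.

-- ===== PORT A =====
-- one loop iteration of A (split? "/" is always `some`: the separator is nonempty;
-- pyGet? os_arch 1 = none is Python's IndexError, excluded by Pre_, so `.getD ""` is unreached there)
def pvAStep (d : PySem.Dict String (List String)) (build : String) : PySem.Dict String (List String) :=
  let os_arch := (PySem.Str.split? build "/").getD []
  let k := os_arch.headD ""          -- os_arch[0]: split results are never empty
  let a := (PySem.List.pyGet? os_arch 1).getD ""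
  let d1 := if a = "*" then d.insert k ["*"] else d
  if d1.contains k then
    if ((PySem.List.pyGet? (d1.getD k []) 0).getD "") ≠ "*" then d1.modify k [] (· ++ [a]) else d1
  else d1.insert k [a]

def create_builds_array (builds : String) : List (String × List String) :=
  if builds ≠ "" then
    (((PySem.Str.split? builds ":").getD []).foldl pvAStep PySem.Dict.empty).items
  else
    (PySem.Dict.empty : PySem.Dict String (List String)).items

-- ===== PORT B =====
-- first pass of B: setdefault(parts[0], []).append(parts[1]) = Dict.modify with default []
def pvBStep (d : PySem.Dict String (List String)) (build : String) : PySem.Dict String (List String) :=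
  let parts := (PySem.Str.split? build "/").getD []
  d.modify (parts.headD "") [] (· ++ [(PySem.List.pyGet? parts 1).getD ""])

def create_builds_array_alt (builds : String) : List (String × List String) :=
  if builds ≠ "" then
    ((((PySem.Str.split? builds ":").getD []).foldl pvBStep PySem.Dict.empty).items).map
      (fun kv => if "*" ∈ kv.2 then (kv.1, ["*"]) else kv)
  else
    (PySem.Dict.empty : PySem.Dict String (List String)).items

-- ===== PRECONDITION & SPEC =====
-- Pre_ excludes exactly the inputs where Python A raises IndexError: a nonempty build string
-- with some ':'-token lacking a '/' (both A and B index parts[1] and raise there).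
def Pre_create_builds_array (builds : String) : Prop :=
  builds = "" ∨ ∀ t ∈ (PySem.Str.split? builds ":").getD [], 2 ≤ ((PySem.Str.split? t "/").getD []).length
instance (builds : String) : Decidable (Pre_create_builds_array builds) := by
  unfold Pre_create_builds_array; infer_instance

def pvWitness_create_builds_array : String := "linux/amd64:linux/*:windows/386:linux/arm"

def Spec_create_builds_array (builds : String) (out : List (String × List String)) : Prop := out = create_builds_array_alt builds
instance (builds : String) (out : List (String × List String)) : Decidable (Spec_create_builds_array builds out) := by unfold Spec_create_builds_array; infer_instance

-- ===== CLAIM (what is proved, stated in full; the proofs are below) =====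
def Claim_equal_create_builds_array : Prop := ∀ (builds : String), Dom_create_builds_array builds → Pre_create_builds_array builds → Spec_create_builds_array builds (create_builds_array builds)

-- ===== LEMMAS AND PROOFS =====

-- normalization applied by B's second pass, on one value / one entry
def pvNorm (v : List String) : List String := if "*" ∈ v then ["*"] else v
def pvF (kv : String × List String) : String × List String := (kv.1, pvNorm kv.2)

theorem pvF_eq (kv : String × List String) :
    pvF kv = if "*" ∈ kv.2 then (kv.1, ["*"]) else kv := by
  unfold pvF pvNorm; split <;> rfl

theorem pv_contains_map (l : List (String × List String)) (k : String) :
    (PySem.Dict.mk (l.map pvF)).contains k = (PySem.Dict.mk l).contains k := by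
  simp only [PySem.Dict.contains, List.any_map]
  congr 1

theorem pv_get?_map (l : List (String × List String)) (k : String) :
    (PySem.Dict.mk (l.map pvF)).get? k = ((PySem.Dict.mk l).get? k).map pvNorm := by
  simp only [PySem.Dict.get?, List.find?_map]
  have hpred : ((fun p : String × List String => p.1 == k) ∘ pvF) =
      (fun p : String × List String => p.1 == k) := rfl
  rw [hpred]
  cases List.find? (fun p : String × List String => p.1 == k) l <;> simp [pvF]

theorem pvF_fst (kv : String × List String) : (pvF kv).1 = kv.1 := rfl

-- the per-token commutation, with the split-off key and arch as free variables
theorem pvStep_comm_core (l : List (String × List String))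
    (hnd : (PySem.Dict.mk l).keys.Nodup) (k a : String) :
    (let d1 := if a = "*" then (PySem.Dict.mk (l.map pvF)).insert k ["*"]
               else PySem.Dict.mk (l.map pvF);
     if d1.contains k = true then
       if ((PySem.List.pyGet? (d1.getD k []) 0).getD "") ≠ "*" then
         d1.insert k (d1.getD k [] ++ [a])
       else d1
     else d1.insert k [a]) =
    PySem.Dict.mk (((PySem.Dict.mk l).insert k ((PySem.Dict.mk l).getD k [] ++ [a])).items.map pvF) := by
  by_cases hA : a = "*"
  · subst hA
    simp only [PySem.List.pyGet?, PySem.List.pyIdx?, ne_eq]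
    norm_num
    by_cases hc : (PySem.Dict.mk l).contains k = true
    · have hc' := (pv_contains_map l k).trans hc
      apply PySem.Dict.ext
      simp only [PySem.Dict.insert, hc', hc, if_pos, List.map_map]
      apply List.map_congr_left
      intro p _
      by_cases hpk : p.1 == k <;> simp [Function.comp, hpk, pvF, pvNorm]
    · have hc'' : (PySem.Dict.mk l).contains k = false := by
        simp only [Bool.not_eq_true] at hc; exact hc
      have hc' : (PySem.Dict.mk (l.map pvF)).contains k = false := by
        rw [pv_contains_map]; exact hc''
      apply PySem.Dict.ext
      simp only [PySem.Dict.insert, hc', hc'', Bool.false_eq_true, if_false]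
      simp [pvF, pvNorm]
  · simp only [if_neg hA]
    by_cases hc : (PySem.Dict.mk l).contains k = true
    · obtain ⟨v, hv⟩ : ∃ v, (PySem.Dict.mk l).get? k = some v := by
        rw [← Option.isSome_iff_exists, ← PySem.Dict.contains_eq_isSome_get?]; exact hc
      have hcm : (PySem.Dict.mk (l.map pvF)).contains k = true := (pv_contains_map l k).trans hc
      have hgD : (PySem.Dict.mk (l.map pvF)).getD k [] = pvNorm v := by
        rw [PySem.Dict.getD_eq_get?_getD, pv_get?_map, hv]; rfl
      have hgD' : (PySem.Dict.mk l).getD k [] = v := by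
        rw [PySem.Dict.getD_eq_get?_getD, hv]; rfl
      simp only [hcm, if_pos, hgD, hgD']
      by_cases hm : "*" ∈ v
      · have hnv : pvNorm v = ["*"] := by simp [pvNorm, hm]
        simp only [hnv, PySem.List.pyGet?, PySem.List.pyIdx?, ne_eq]
        norm_num
        simp only [PySem.Dict.insert, hc, if_pos, List.map_map]
        apply List.map_congr_left
        intro p hp
        by_cases hpk : p.1 == k
        · have hpk' : p.1 = k := eq_of_beq hpk
          have hpv : p.2 = v := by
            have := PySem.Dict.get?_of_mem_items (PySem.Dict.mk l) (k := p.1) (v := p.2)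
              (by simpa using hp) hnd
            rw [hpk', hv] at this
            exact (Option.some_inj.mp this).symm
          simp [Function.comp, pvF, pvNorm, hpv, hm, hpk']
        · simp [Function.comp, hpk]
      · have hnv : pvNorm v = v := by simp [pvNorm, hm]
        have hcond : ((PySem.List.pyGet? (pvNorm v) 0).getD "") ≠ "*" := by
          rw [hnv]
          cases v with
          | nil => simp [PySem.List.pyGet?, PySem.List.pyIdx?]
          | cons x xs =>
              have hx : x ≠ "*" := fun h => hm (h ▸ List.mem_cons_self ..)
              simpa [PySem.List.pyGet?, PySem.List.pyIdx?] using hx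
        rw [if_pos hcond, hnv]
        apply PySem.Dict.ext
        simp only [PySem.Dict.insert, hc, hcm, if_pos, List.map_map]
        apply List.map_congr_left
        intro p _
        by_cases hpk : p.1 == k
        · have : "*" ∉ v ++ [a] := by simp [hm, Ne.symm hA]
          simp [Function.comp, hpk, pvF, pvNorm, this]
        · simp [Function.comp, hpk, pvF_fst]
    · have hc'' : (PySem.Dict.mk l).contains k = false := by
        simp only [Bool.not_eq_true] at hc; exact hc
      have hcm : (PySem.Dict.mk (l.map pvF)).contains k = false := by
        rw [pv_contains_map]; exact hc''
      have hgD : (PySem.Dict.mk l).getD k [] = [] :=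
        PySem.Dict.getD_of_not_contains _ _ hc''
      simp only [hcm, Bool.false_eq_true, if_false, hgD]
      apply PySem.Dict.ext
      simp only [PySem.Dict.insert, hcm, hc'', Bool.false_eq_true, if_false]
      simp [pvF, pvNorm, Ne.symm hA]

theorem pvStep_comm (l : List (String × List String))
    (hnd : (PySem.Dict.mk l).keys.Nodup) (t : String) :
    pvAStep (PySem.Dict.mk (l.map pvF)) t = PySem.Dict.mk ((pvBStep (PySem.Dict.mk l) t).items.map pvF) := by
  simp only [pvAStep, pvBStep, PySem.Dict.modify]
  exact pvStep_comm_core l hnd _ _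

theorem pv_nodup_step (l : List (String × List String))
    (hnd : (PySem.Dict.mk l).keys.Nodup) (t : String) :
    (PySem.Dict.mk ((pvBStep (PySem.Dict.mk l) t).items)).keys.Nodup := by
  simp only [pvBStep, PySem.Dict.modify]
  exact PySem.Dict.nodup_keys_insert _ _ _ hnd

theorem pv_foldl_comm (toks : List String) (l : List (String × List String))
    (hnd : (PySem.Dict.mk l).keys.Nodup) :
    toks.foldl pvAStep (PySem.Dict.mk (l.map pvF)) =
      PySem.Dict.mk ((toks.foldl pvBStep (PySem.Dict.mk l)).items.map pvF) := by
  induction toks generalizing l with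
  | nil => rfl
  | cons t ts ih =>
      simp only [List.foldl_cons]
      rw [pvStep_comm l hnd t]
      have := ih ((pvBStep (PySem.Dict.mk l) t).items) (pv_nodup_step l hnd t)
      simpa using this

-- ===== VERDICT (by name: the statement is the Claim_ definition above) =====
theorem create_builds_array_spec : Claim_equal_create_builds_array := by
  intro builds _ _
  unfold Spec_create_builds_array create_builds_array create_builds_array_alt
  by_cases hb : builds = ""
  · simp [hb]
  · simp only [hb, ne_eq, not_false_iff, if_true]
    have h := pv_foldl_comm ((PySem.Str.split? builds ":").getD []) [] (by simp [PySem.Dict.keys])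
    simp only [List.map_nil] at h
    rw [show (PySem.Dict.empty : PySem.Dict String (List String)) = PySem.Dict.mk [] from rfl, h]
    simp [pvF_eq]
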